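-- pv_equiv track=rewrite | github.com/Choeseonjeong/Baekjoon | 프로그래머스/0/181926. 수 조작하기 1/수 조작하기 1.py | solution
-- ===== SOURCE A (Python) =====
-- def solution(n, control):
--     control_list = list(control)
--     result = n
--     for i in control_list:
--         if i == "w":
--             result += 1
--         elif i == "s":
--             result -= 1
--         elif i == "d":
--             result += 10
--         else:
--             result -= 10
--     return result
-- ===== SOURCE B (Python) =====
-- def solution(n, control):
--     cl = list(control)
--     w = cl.count("w")
--     s = cl.count("s")
--     d = cl.count("d")
--     return n + w - s + 10 * d - 10 * (len(cl) - w - s - d)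
-- ===== Notes on version B (the rewrite author's own statement) =====
-- stated objective: alternative
-- what changed: Replaces the per-character accumulator loop by tallying the counts of 'w', 's', 'd' once and returning a closed-form arithmetic expression (the -10 group is the complement of those counts).
import Mathlib
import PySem

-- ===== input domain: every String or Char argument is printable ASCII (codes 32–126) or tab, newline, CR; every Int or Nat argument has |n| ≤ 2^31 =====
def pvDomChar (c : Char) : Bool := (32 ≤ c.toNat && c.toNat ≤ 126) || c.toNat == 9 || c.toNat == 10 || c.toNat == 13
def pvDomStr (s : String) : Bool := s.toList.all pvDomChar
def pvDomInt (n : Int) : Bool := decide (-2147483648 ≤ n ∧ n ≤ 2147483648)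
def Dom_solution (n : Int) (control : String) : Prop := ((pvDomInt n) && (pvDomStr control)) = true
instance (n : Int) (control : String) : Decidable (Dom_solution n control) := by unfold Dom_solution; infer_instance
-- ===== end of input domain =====

-- B replaces the per-character accumulator loop by three character counts and one closed-form arithmetic expression.

-- ===== PORT A =====
def solution (n : Int) (control : String) : Int :=
  let control_list := control.toList
  control_list.foldl (fun result i =>
    if i = 'w' then result + 1
    else if i = 's' then result - 1
    else if i = 'd' then result + 10
    else result - 10) n

-- ===== PORT B =====
def solution_alt (n : Int) (control : String) : Int :=
  let cl := control.toList
  let w : Int := cl.count 'w'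
  let s : Int := cl.count 's'
  let d : Int := cl.count 'd'
  n + w - s + 10 * d - 10 * ((cl.length : Int) - w - s - d)

-- ===== PRECONDITION & SPEC =====
def Spec_solution (n : Int) (control : String) (out : Int) : Prop := out = solution_alt n control
instance (n : Int) (control : String) (out : Int) : Decidable (Spec_solution n control out) := by unfold Spec_solution; infer_instance

-- ===== CLAIM (what is proved, stated in full; the proofs are below) =====
def Claim_equal_solution : Prop := ∀ (n : Int) (control : String), Dom_solution n control → Spec_solution n control (solution n control)

-- ===== LEMMAS AND PROOFS =====
theorem solution_fold_eq (l : List Char) (n : Int) :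
    l.foldl (fun result i =>
      if i = 'w' then result + 1
      else if i = 's' then result - 1
      else if i = 'd' then result + 10
      else result - 10) n
    = n + l.count 'w' - l.count 's' + 10 * l.count 'd'
      - 10 * ((l.length : Int) - l.count 'w' - l.count 's' - l.count 'd') := by
  induction l generalizing n with
  | nil => simp
  | cons c t ih =>
    simp only [List.foldl_cons, List.count_cons, List.length_cons, ih]
    by_cases hw : c = 'w' <;> by_cases hs : c = 's' <;> by_cases hd : c = 'd' <;>
      simp_all <;> ring

-- ===== VERDICT (by name: the statement is the Claim_ definition above) =====
theorem solution_spec : Claim_equal_solution := by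
  intro n control _
  unfold Spec_solution solution solution_alt
  exact solution_fold_eq control.toList n
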